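-- pv_equiv track=rewrite | github.com/zesumon/reqwatch | reqwatch/snapshot_health.py | _consecutive_errors
-- ===== SOURCE A (Python) =====
-- def _consecutive_errors(snapshots: list) -> int:
--     """Count trailing consecutive snapshots that have an error field set."""
--     count = 0
--     for snap in reversed(snapshots):
--         if snap.get("error"):
--             count += 1
--         else:
--             break
--     return count
-- ===== SOURCE B (Python) =====
-- def _consecutive_errors(snapshots: list) -> int:
--     """Count trailing consecutive snapshots that have an error field set."""
--     count = 0
--     for snap in snapshots:
--         count = count + 1 if snap.get("error") else 0
--     return count
-- ===== Notes on version B (the rewrite author's own statement) =====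
-- stated objective: alternative
-- what changed: Single forward pass with a reset-to-zero accumulator replaces the reversed() scan with an early break.
import Mathlib
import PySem

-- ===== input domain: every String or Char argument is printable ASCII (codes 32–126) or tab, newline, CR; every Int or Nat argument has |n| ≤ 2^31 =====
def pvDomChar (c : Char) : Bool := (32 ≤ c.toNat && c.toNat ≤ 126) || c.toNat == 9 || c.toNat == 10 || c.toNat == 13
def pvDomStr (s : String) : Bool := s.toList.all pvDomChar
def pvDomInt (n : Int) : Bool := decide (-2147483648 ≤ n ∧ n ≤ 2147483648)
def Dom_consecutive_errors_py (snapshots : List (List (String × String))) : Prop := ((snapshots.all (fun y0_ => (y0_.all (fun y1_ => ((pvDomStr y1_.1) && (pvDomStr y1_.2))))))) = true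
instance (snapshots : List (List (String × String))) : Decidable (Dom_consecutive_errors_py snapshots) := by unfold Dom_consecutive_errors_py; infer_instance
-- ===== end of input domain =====

-- B replaces A's reversed() scan with an early break by a single forward pass
-- keeping a reset-to-zero accumulator (objective: alternative decomposition).

-- truthiness of snap.get("error"): present with a non-empty string value
def pvErrTruthy (snap : List (String × String)) : Bool :=
  match (PySem.Dict.mk snap).get? "error" with
  | some v => !(v == "")
  | none => false

-- ===== PORT A =====
-- A's loop over reversed(snapshots) with a break, carrying the running count
def pvGoA (count : Int) : List (List (String × String)) → Int
  | [] => count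
  | s :: rest => if pvErrTruthy s then pvGoA (count + 1) rest else count

def consecutive_errors_py (snapshots : List (List (String × String))) : Int :=
  pvGoA 0 snapshots.reverse

-- ===== PORT B =====
def consecutive_errors_py_alt (snapshots : List (List (String × String))) : Int :=
  snapshots.foldl (fun c s => if pvErrTruthy s then c + 1 else 0) 0

-- ===== PRECONDITION & SPEC =====
def Spec_consecutive_errors_py (snapshots : List (List (String × String))) (out : Int) : Prop := out = consecutive_errors_py_alt snapshots
instance (snapshots : List (List (String × String))) (out : Int) : Decidable (Spec_consecutive_errors_py snapshots out) := by unfold Spec_consecutive_errors_py; infer_instance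

-- ===== CLAIM (what is proved, stated in full; the proofs are below) =====
def Claim_equal_consecutive_errors_py : Prop := ∀ (snapshots : List (List (String × String))), Dom_consecutive_errors_py snapshots → Spec_consecutive_errors_py snapshots (consecutive_errors_py snapshots)

-- ===== LEMMAS AND PROOFS =====

-- length of the leading run of error snapshots
def pvTw : List (List (String × String)) → Int
  | [] => 0
  | s :: rest => if pvErrTruthy s then 1 + pvTw rest else 0

theorem pvGoA_eq (xs : List (List (String × String))) :
    ∀ c : Int, pvGoA c xs = c + pvTw xs := by
  induction xs with
  | nil => intro c; simp [pvGoA, pvTw]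
  | cons s rest ih =>
    intro c
    simp only [pvGoA, pvTw]
    by_cases h : pvErrTruthy s = true
    · simp [h, ih]; ring
    · simp [h]

theorem pvTw_all (xs : List (List (String × String))) (h : xs.all pvErrTruthy = true) :
    pvTw xs = (xs.length : Int) := by
  induction xs with
  | nil => simp [pvTw]
  | cons s rest ih =>
    simp only [List.all_cons, Bool.and_eq_true] at h
    simp [pvTw, h.1, ih h.2]
    ring

theorem pvTw_append (l m : List (List (String × String))) :
    pvTw (l ++ m) =
      if l.all pvErrTruthy then (l.length : Int) + pvTw m else pvTw l := by
  induction l with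
  | nil => simp [pvTw]
  | cons s rest ih =>
    by_cases hs : pvErrTruthy s = true <;>
    by_cases hr : rest.all pvErrTruthy = true <;>
      simp [pvTw, hs, hr, ih] <;> ring

theorem pvFoldl_eq (xs : List (List (String × String))) :
    ∀ c : Int,
      xs.foldl (fun c s => if pvErrTruthy s then c + 1 else 0) c =
        if xs.all pvErrTruthy then c + (xs.length : Int) else pvTw xs.reverse := by
  induction xs with
  | nil => intro c; simp [pvTw]
  | cons s rest ih =>
    intro c
    simp only [List.foldl_cons, ih, List.all_cons, List.reverse_cons, pvTw_append]
    by_cases hr : rest.all pvErrTruthy = true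
    · by_cases hs : pvErrTruthy s = true
      · simp [hs, hr, List.all_reverse]; ring
      · simp [hs, hr, List.all_reverse, pvTw, pvTw_all rest.reverse (by simpa [List.all_reverse] using hr)]
    · by_cases hs : pvErrTruthy s = true <;>
        simp [hs, hr, List.all_reverse]

-- ===== VERDICT (by name: the statement is the Claim_ definition above) =====
theorem consecutive_errors_py_spec : Claim_equal_consecutive_errors_py := by
  intro xs _
  unfold Spec_consecutive_errors_py consecutive_errors_py consecutive_errors_py_alt
  rw [pvGoA_eq, pvFoldl_eq]
  by_cases h : xs.all pvErrTruthy = true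
  · simp [h, pvTw_all xs.reverse (by simpa [List.all_reverse] using h)]
  · simp [h]
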